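-- pv_equiv track=rewrite | github.com/bioio-devs/bioio-tifffile | bioio_tifffile/reader.py | _merge_dim_guesses
-- ===== SOURCE A (Python) =====
-- UNKNOWN_DIM_CHARS = ["Q", "I"]
--
-- def _merge_dim_guesses(dims_from_meta: str, guessed_dims: str) -> str:
--     # Construct a "best guess" (super naive)
--     best_guess = []
--     for dim_from_meta in dims_from_meta:
--         # Dim from meta is recognized, add it
--         if dim_from_meta not in UNKNOWN_DIM_CHARS:
--             best_guess.append(dim_from_meta)
--
--         # Dim from meta isn't recognized
--         # Find next dim that isn't already in best guess or dims from meta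
--         else:
--             appended_dim = False
--             for guessed_dim in guessed_dims:
--                 if (
--                     guessed_dim not in best_guess
--                     and guessed_dim not in dims_from_meta
--                 ):
--                     best_guess.append(guessed_dim)
--                     appended_dim = True
--                     break
--
--             # All of our guess dims were already in the best guess list,
--             # append the dim read from meta
--             if not appended_dim:
--                 best_guess.append(dim_from_meta)
--
--     return "".join(best_guess)
-- ===== SOURCE B (Python) =====
-- UNKNOWN_DIM_CHARS = ["Q", "I"]
--
--
-- def _merge_dim_guesses(dims_from_meta: str, guessed_dims: str) -> str:
--     # Precompute, in one pass, the ordered distinct guessed chars usable as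
--     # substitutions (those not present in dims_from_meta), then consume them
--     # linearly while walking dims_from_meta once.
--     subs = []
--     for g in guessed_dims:
--         if g not in dims_from_meta and g not in subs:
--             subs.append(g)
--     out = []
--     i = 0
--     for c in dims_from_meta:
--         if c not in UNKNOWN_DIM_CHARS:
--             out.append(c)
--         elif i < len(subs):
--             out.append(subs[i])
--             i += 1
--         else:
--             out.append(c)
--     return "".join(out)
-- ===== Notes on version B (the rewrite author's own statement) =====
-- stated objective: alternative
-- what changed: B precomputes once the ordered deduplicated list of guessed chars absent from dims_from_meta and consumes it linearly with an index pointer, instead of A's restart-from-start inner scan of guessed_dims at every unknown meta char.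
import Mathlib
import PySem

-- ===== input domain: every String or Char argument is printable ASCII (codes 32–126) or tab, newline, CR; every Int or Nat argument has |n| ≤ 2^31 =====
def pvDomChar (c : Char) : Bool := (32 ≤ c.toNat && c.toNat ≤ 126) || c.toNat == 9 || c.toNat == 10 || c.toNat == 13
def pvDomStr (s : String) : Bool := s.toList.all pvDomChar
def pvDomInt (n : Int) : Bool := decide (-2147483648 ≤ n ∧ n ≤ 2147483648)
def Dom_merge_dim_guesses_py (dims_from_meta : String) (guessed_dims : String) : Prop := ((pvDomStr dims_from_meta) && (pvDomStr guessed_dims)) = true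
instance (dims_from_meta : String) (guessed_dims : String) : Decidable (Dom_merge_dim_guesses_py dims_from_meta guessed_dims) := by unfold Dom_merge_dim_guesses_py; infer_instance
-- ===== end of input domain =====

-- B replaces A's restart-from-start inner scan by a precomputed substitution list
-- consumed linearly (objective: alternative decomposition, same observable result).

-- ===== PORT A =====
def unknownDimChars : List Char := ['Q', 'I']

-- A's inner `for guessed_dim in guessed_dims: … break` loop
def pyA_inner (best metaL : List Char) : List Char → Option Char
  | [] => none
  | g :: gs =>
      if !best.contains g && !metaL.contains g then some g
      else pyA_inner best metaL gs

-- A's outer loop over dims_from_meta carrying best_guess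
def pyA_loop (metaL gl : List Char) (best : List Char) : List Char → List Char
  | [] => best
  | c :: ms =>
      if unknownDimChars.contains c = false then
        pyA_loop metaL gl (best ++ [c]) ms
      else
        match pyA_inner best metaL gl with
        | some x => pyA_loop metaL gl (best ++ [x]) ms   -- appended_dim = True
        | none => pyA_loop metaL gl (best ++ [c]) ms      -- appended_dim stayed False

def merge_dim_guesses_py (dims_from_meta : String) (guessed_dims : String) : String :=
  String.mk (pyA_loop dims_from_meta.toList guessed_dims.toList [] dims_from_meta.toList)

-- ===== PORT B =====
-- B's first loop: ordered distinct guessed chars absent from dims_from_meta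
def buildSubs (metaL : List Char) (subs : List Char) : List Char → List Char
  | [] => subs
  | g :: gs =>
      buildSubs metaL
        (if !metaL.contains g && !subs.contains g then subs ++ [g] else subs) gs

-- B's second loop: walk dims_from_meta, consuming the substitution list linearly
def altWalk (subs : List Char) : List Char → List Char
  | [] => []
  | c :: ms =>
      if unknownDimChars.contains c = false then c :: altWalk subs ms
      else
        match subs with
        | [] => c :: altWalk [] ms
        | s :: ss => s :: altWalk ss ms

def merge_dim_guesses_py_alt (dims_from_meta : String) (guessed_dims : String) : String :=
  String.mk (altWalk (buildSubs dims_from_meta.toList [] guessed_dims.toList) dims_from_meta.toList)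

-- ===== PRECONDITION & SPEC =====
def Spec_merge_dim_guesses_py (dims_from_meta : String) (guessed_dims : String) (out : String) : Prop := out = merge_dim_guesses_py_alt dims_from_meta guessed_dims
instance (dims_from_meta : String) (guessed_dims : String) (out : String) : Decidable (Spec_merge_dim_guesses_py dims_from_meta guessed_dims out) := by unfold Spec_merge_dim_guesses_py; infer_instance

-- ===== CLAIM (what is proved, stated in full; the proofs are below) =====
def Claim_equal_merge_dim_guesses_py : Prop := ∀ (dims_from_meta : String) (guessed_dims : String), Dom_merge_dim_guesses_py dims_from_meta guessed_dims → Spec_merge_dim_guesses_py dims_from_meta guessed_dims (merge_dim_guesses_py dims_from_meta guessed_dims)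

-- ===== LEMMAS AND PROOFS =====

-- A's inner scan is a find? over guessed_dims
lemma pyA_inner_eq_find (metaL best : List Char) :
    ∀ gl : List Char,
      pyA_inner best metaL gl
        = gl.find? (fun g => !best.contains g && !metaL.contains g) := by
  intro gl
  induction gl with
  | nil => rfl
  | cons g gs ih =>
      rw [pyA_inner, List.find?_cons]
      cases h : (!best.contains g && !metaL.contains g) <;> simp [ih]

-- find? over buildSubs' result, for any value predicate
lemma buildSubs_find (metaL : List Char) (q : Char → Bool) :
    ∀ (gl acc : List Char),
      (buildSubs metaL acc gl).find? q
        = (acc.find? q).or (gl.find? (fun g => q g && !metaL.contains g)) := by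
  intro gl
  induction gl with
  | nil => intro acc; simp [buildSubs]
  | cons g gs ih =>
      intro acc
      by_cases hm : g ∈ metaL
      · rw [buildSubs, if_neg (by simp [hm]), ih, List.find?_cons]
        simp [hm]
      · by_cases ha : g ∈ acc
        · rw [buildSubs, if_neg (by simp [ha]), ih, List.find?_cons]
          by_cases hq : q g = true
          · have hs : (acc.find? q).isSome := by
              rw [List.find?_isSome]
              exact ⟨g, ha, hq⟩
            obtain ⟨y, hy⟩ := Option.isSome_iff_exists.mp hs
            simp [hy, hm, hq]
          · rw [Bool.not_eq_true] at hq
            simp [hq]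
        · rw [buildSubs, if_pos (by simp [hm, ha]), ih, List.find?_append,
            Option.or_assoc, List.find?_cons]
          by_cases hq : q g = true
          · simp [hq, hm]
          · rw [Bool.not_eq_true] at hq
            simp [hq]

lemma buildSubs_nodup (metaL : List Char) :
    ∀ (gl acc : List Char), acc.Nodup → (buildSubs metaL acc gl).Nodup := by
  intro gl
  induction gl with
  | nil => intro acc h; simpa [buildSubs] using h
  | cons g gs ih =>
      intro acc h
      rw [buildSubs]
      by_cases hc : (!metaL.contains g && !acc.contains g) = true
      · rw [if_pos hc]
        apply ih
        have hg : g ∉ acc := by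
          simp only [Bool.and_eq_true, Bool.not_eq_true'] at hc
          simpa using hc.2
        have hdj : acc.Disjoint [g] := by
          intro a ha hag
          simp only [List.mem_singleton] at hag
          exact hg (hag ▸ ha)
        exact List.Nodup.append h (by simp) hdj
      · rw [if_neg hc]
        exact ih acc h

lemma buildSubs_not_meta (metaL : List Char) :
    ∀ (gl acc : List Char) (x : Char), x ∈ buildSubs metaL acc gl →
      x ∈ acc ∨ metaL.contains x = false := by
  intro gl
  induction gl with
  | nil => intro acc x h; exact Or.inl (by simpa [buildSubs] using h)
  | cons g gs ih =>
      intro acc x h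
      rw [buildSubs] at h
      by_cases hc : (!metaL.contains g && !acc.contains g) = true
      · rw [if_pos hc] at h
        rcases ih _ x h with h' | h'
        · rcases List.mem_append.mp h' with h'' | h''
          · exact Or.inl h''
          · simp only [List.mem_singleton] at h''
            subst h''
            simp only [Bool.and_eq_true, Bool.not_eq_true'] at hc
            exact Or.inr hc.1
        · exact Or.inr h'
      · rw [if_neg hc] at h
        exact ih acc x h

-- Main invariant: A's loop from `best` equals `best ++` B's walk over the
-- remaining substitution list, when subsRem is exactly the not-yet-used part.
lemma main_loop (metaL gl subs : List Char)
    (hsubs : subs = buildSubs metaL [] gl)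
    (hnd : subs.Nodup)
    (hnm : ∀ x ∈ subs, metaL.contains x = false) :
    ∀ (ms best subsRem : List Char), (∀ c ∈ ms, c ∈ metaL) →
      subs.filter (fun x => !best.contains x) = subsRem →
      pyA_loop metaL gl best ms = best ++ altWalk subsRem ms := by
  intro ms
  induction ms with
  | nil => intro best subsRem _ _; simp [pyA_loop, altWalk]
  | cons c ms ih =>
      intro best subsRem hms hfil
      have hc : c ∈ metaL := hms c (by simp)
      have hms' : ∀ x ∈ ms, x ∈ metaL := fun x hx => hms x (by simp [hx])
      -- A's inner scan yields exactly the head of subsRem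
      have hinner : pyA_inner best metaL gl = subsRem.head? := by
        rw [pyA_inner_eq_find, ← hfil, List.head?_filter, hsubs,
          buildSubs_find metaL (fun x => !best.contains x) gl []]
        simp
      by_cases hu : unknownDimChars.contains c = true
      · have hu' : c ∈ unknownDimChars := by simpa using hu
        -- unknown meta char: consume the head of subsRem, or fall back to c
        cases hrem : subsRem with
        | nil =>
            have hnone : pyA_inner best metaL gl = none := by simp [hinner, hrem]
            have hfil0 : ∀ x ∈ subs, x ∈ best := by
              intro x hx
              have := List.filter_eq_nil_iff.mp (hfil.trans (by rw [hrem])) x hx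
              simpa using this
            have hfil' : subs.filter (fun x => !(best ++ [c]).contains x) = [] := by
              rw [List.filter_eq_nil_iff]
              intro x hx
              simp [List.mem_append, hfil0 x hx]
            have hrw : altWalk [] (c :: ms) = c :: altWalk [] ms := by
              rw [altWalk, if_neg (by simp [hu'])]
            rw [pyA_loop, if_neg (by simp [hu']), hnone, hrw]
            show pyA_loop metaL gl (best ++ [c]) ms = best ++ (c :: altWalk [] ms)
            rw [ih (best ++ [c]) [] hms' hfil']
            simp
        | cons s ss =>
            have hsome : pyA_inner best metaL gl = some s := by simp [hinner, hrem]
            have hss : s ∉ ss := by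
              have hn : (s :: ss).Nodup := by
                rw [← hrem, ← hfil]; exact hnd.filter _
              exact (List.nodup_cons.mp hn).1
            have hfil' : subs.filter (fun x => !(best ++ [s]).contains x) = ss := by
              have h1 : (fun x => !(best ++ [s]).contains x)
                  = (fun x => !(x == s) && !best.contains x) := by
                funext x
                by_cases hb : x ∈ best <;> by_cases hx : x = s <;>
                  simp [hb, hx, List.mem_append]
              rw [h1, ← List.filter_filter, hfil, hrem, List.filter_cons]
              simp only [beq_self_eq_true, Bool.not_true, Bool.false_eq_true,
                if_false]
              apply List.filter_eq_self.mpr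
              intro x hx
              have hxs : x ≠ s := fun he => hss (he ▸ hx)
              simp [hxs]
            have hrw : altWalk (s :: ss) (c :: ms) = s :: altWalk ss ms := by
              rw [altWalk, if_neg (by simp [hu'])]
            rw [pyA_loop, if_neg (by simp [hu']), hsome, hrw]
            show pyA_loop metaL gl (best ++ [s]) ms = best ++ (s :: altWalk ss ms)
            rw [ih (best ++ [s]) ss hms' hfil']
            simp
      · -- recognized meta char: best grows by c, subsRem unchanged (c ∈ metaL)
        rw [Bool.not_eq_true] at hu
        have hfil' : subs.filter (fun x => !(best ++ [c]).contains x) = subsRem := by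
          rw [← hfil]
          apply List.filter_congr
          intro x hx
          have hxm := hnm x hx
          have hxc : x ≠ c := by
            intro he
            rw [he] at hxm
            simp [hc] at hxm
          simp [List.mem_append, hxc]
        have hrw : altWalk subsRem (c :: ms) = c :: altWalk subsRem ms := by
          cases subsRem <;> rw [altWalk, if_pos hu]
        rw [pyA_loop, if_pos hu, ih (best ++ [c]) subsRem hms' hfil', hrw]
        simp

-- ===== VERDICT (by name: the statement is the Claim_ definition above) =====
theorem merge_dim_guesses_py_spec : Claim_equal_merge_dim_guesses_py := by
  intro d g _
  show merge_dim_guesses_py d g = merge_dim_guesses_py_alt d g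
  unfold merge_dim_guesses_py merge_dim_guesses_py_alt
  congr 1
  have hnd := buildSubs_nodup d.toList g.toList [] (by simp)
  have hnm : ∀ x ∈ buildSubs d.toList [] g.toList, d.toList.contains x = false := by
    intro x hx
    rcases buildSubs_not_meta d.toList g.toList [] x hx with h | h
    · simp at h
    · exact h
  have := main_loop d.toList g.toList (buildSubs d.toList [] g.toList) rfl hnd hnm
    d.toList [] (buildSubs d.toList [] g.toList) (fun c hc => hc)
    (by apply List.filter_eq_self.mpr; intro x _; simp)
  simpa using this
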